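-- pv_equiv track=rewrite | github.com/hsu07985-creator/ChatICU | backend/app/services/duplicate_detector.py | _strip_salt_suffix
-- ===== SOURCE A (Python) =====
-- from typing import Any, Callable, Dict, Iterable, List, Literal, Optional, Set, Tuple
--
-- def _strip_salt_suffix(name: str) -> str:
--     """Best-effort ingredient salt stripping for display.
--
--     Handles common salts: sodium, potassium, magnesium, calcium, hydrochloride,
--     sulfate, tartrate, maleate, mesylate, phosphate, succinate, fumarate.
--     """
--     if not name:
--         return name
--     lowered = name.lower()
--     for suffix in _SALT_SUFFIXES:
--         if lowered.endswith(" " + suffix):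
--             return name[: -(len(suffix) + 1)].strip()
--     return name.strip()
--
-- _SALT_SUFFIXES: Tuple[str, ...] = (
--     "sodium",
--     "potassium",
--     "magnesium",
--     "calcium",
--     "hydrochloride",
--     "hcl",
--     "sulfate",
--     "sulphate",
--     "tartrate",
--     "maleate",
--     "mesylate",
--     "besylate",
--     "tosylate",
--     "phosphate",
--     "succinate",
--     "fumarate",
--     "citrate",
--     "acetate",
--     "bitartrate",
--     "hydrobromide",
-- )
-- ===== SOURCE B (Python) =====
-- _SALT_SET = frozenset((
--     "sodium", "potassium", "magnesium", "calcium", "hydrochloride", "hcl",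
--     "sulfate", "sulphate", "tartrate", "maleate", "mesylate", "besylate",
--     "tosylate", "phosphate", "succinate", "fumarate", "citrate", "acetate",
--     "bitartrate", "hydrobromide",
-- ))
--
-- def _strip_salt_suffix(name: str) -> str:
--     if not name:
--         return name
--     lowered = name.lower()
--     idx = lowered.rfind(' ')
--     if idx == -1:
--         return name.strip()
--     if lowered[idx + 1:] in _SALT_SET:
--         return name[:idx].strip()
--     return name.strip()
-- ===== Notes on version B (the rewrite author's own statement) =====
-- stated objective: alternative
-- what changed: Instead of scanning all 20 salt suffixes with endswith, B extracts the token after the last space once (rfind) and checks it with a single set lookup.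
import Mathlib
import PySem

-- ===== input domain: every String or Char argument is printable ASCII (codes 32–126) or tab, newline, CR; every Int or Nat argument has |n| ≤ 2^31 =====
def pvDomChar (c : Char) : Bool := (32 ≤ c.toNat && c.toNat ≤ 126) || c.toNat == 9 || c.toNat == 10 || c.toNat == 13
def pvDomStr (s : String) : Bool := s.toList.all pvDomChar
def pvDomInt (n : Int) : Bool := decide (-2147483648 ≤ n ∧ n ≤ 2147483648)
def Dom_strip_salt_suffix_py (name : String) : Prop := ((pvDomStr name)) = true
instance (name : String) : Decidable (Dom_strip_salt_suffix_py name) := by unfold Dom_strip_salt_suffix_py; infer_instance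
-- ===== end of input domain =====

-- B replaces A's scan over all 20 salt suffixes by extracting the token after the last space once
-- (rfind) and testing it with one set lookup (objective: alternative).

-- ===== PORT A =====
def pvSaltSuffixes : List String :=
  ["sodium", "potassium", "magnesium", "calcium", "hydrochloride", "hcl",
   "sulfate", "sulphate", "tartrate", "maleate", "mesylate", "besylate",
   "tosylate", "phosphate", "succinate", "fumarate", "citrate", "acetate",
   "bitartrate", "hydrobromide"]

-- the 'for suffix in _SALT_SUFFIXES' loop of A, in order; '" " + suffix' is String.ofList (' ' :: …)
def pvStripLoop (name : String) (lowered : String) : List String → String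
  | [] => PySem.Str.strip name
  | suffix :: rest =>
      if PySem.Str.endswith lowered (String.ofList (' ' :: suffix.toList)) then
        PySem.Str.strip (PySem.Str.slice name none (some (-(PySem.Str.len suffix + 1))))
      else pvStripLoop name lowered rest

def strip_salt_suffix_py (name : String) : String :=
  if name = "" then name
  else pvStripLoop name (PySem.Str.lower name) pvSaltSuffixes

-- ===== PORT B =====
def pvSaltSet : PySem.Set String := PySem.Set.ofList
  ["sodium", "potassium", "magnesium", "calcium", "hydrochloride", "hcl",
   "sulfate", "sulphate", "tartrate", "maleate", "mesylate", "besylate",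
   "tosylate", "phosphate", "succinate", "fumarate", "citrate", "acetate",
   "bitartrate", "hydrobromide"]

def strip_salt_suffix_py_alt (name : String) : String :=
  if name = "" then name
  else
    let lowered := PySem.Str.lower name
    let idx := PySem.Str.rfind lowered " "
    if idx = -1 then PySem.Str.strip name
    else if PySem.Set.contains pvSaltSet (PySem.Str.slice lowered (some (idx + 1)) none) then
      PySem.Str.strip (PySem.Str.slice name none (some idx))
    else PySem.Str.strip name

-- ===== PRECONDITION & SPEC =====
def Spec_strip_salt_suffix_py (name : String) (out : String) : Prop := out = strip_salt_suffix_py_alt name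
instance (name : String) (out : String) : Decidable (Spec_strip_salt_suffix_py name out) := by unfold Spec_strip_salt_suffix_py; infer_instance

-- ===== CLAIM (what is proved, stated in full; the proofs are below) =====
def Claim_equal_strip_salt_suffix_py : Prop := ∀ (name : String), Dom_strip_salt_suffix_py name → Spec_strip_salt_suffix_py name (strip_salt_suffix_py name)

-- ===== LEMMAS AND PROOFS =====

-- [c].isPrefixOf xs is just 'the first character of xs is c'
lemma pv_single_isPrefixOf (c : Char) (xs : List Char) :
    [c].isPrefixOf xs = true ↔ xs.head? = some c := by
  rw [List.isPrefixOf_iff_prefix]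
  cases xs with
  | nil => simp
  | cons x t => simp [List.prefix_cons_iff, eq_comm]

-- spec of PySem.Chars.rfind.go for a single-character needle: the greatest index ≤ k holding ' '
lemma pv_go_spec (l : List Char) (k : Nat) :
    PySem.Chars.rfind.go l [' '] k =
      if ∃ j, j ≤ k ∧ l[j]? = some ' '
      then ((Nat.findGreatest (fun j => l[j]? = some ' ') k : Nat) : Int)
      else -1 := by
  induction k with
  | zero =>
    show (if [' '].isPrefixOf l = true then (0 : Int) else -1) = _
    by_cases h0 : l[0]? = some ' '
    · rw [if_pos ((pv_single_isPrefixOf _ _).mpr (by simpa [List.head?_eq_getElem?] using h0)),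
        if_pos ⟨0, le_refl 0, h0⟩]
      simp
    · rw [if_neg (by rw [pv_single_isPrefixOf]; simpa [List.head?_eq_getElem?] using h0),
        if_neg (by rintro ⟨j, hj, hget⟩; interval_cases j; exact h0 hget)]
  | succ k ih =>
    show (if [' '].isPrefixOf (l.drop (k+1)) = true then ((k+1 : Nat) : Int)
          else PySem.Chars.rfind.go l [' '] k) = _
    have hhead : (l.drop (k+1)).head? = l[k+1]? := by
      simp [List.head?_eq_getElem?, List.getElem?_drop]
    by_cases hk : l[k+1]? = some ' '
    · rw [if_pos ((pv_single_isPrefixOf _ _).mpr (hhead.trans hk)),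
        if_pos ⟨k+1, le_refl _, hk⟩, Nat.findGreatest_succ, if_pos hk]
    · rw [if_neg (by rw [pv_single_isPrefixOf]; exact fun h => hk (hhead ▸ h)), ih,
        Nat.findGreatest_succ, if_neg hk]
      congr 1
      simp only [eq_iff_iff]
      constructor
      · rintro ⟨j, hj, hget⟩; exact ⟨j, by omega, hget⟩
      · rintro ⟨j, hj, hget⟩
        refine ⟨j, ?_, hget⟩
        rcases Nat.lt_or_ge j (k+1) with h | h
        · omega
        · exact absurd ((by omega : j = k+1) ▸ hget) hk

lemma pv_rfind_space (l : List Char) :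
    PySem.Chars.rfind l [' '] =
      if ∃ j, j ≤ l.length ∧ l[j]? = some ' '
      then ((Nat.findGreatest (fun j => l[j]? = some ' ') l.length : Nat) : Int)
      else -1 :=
  pv_go_spec l l.length

-- the crucial characterisation: l ends with ' '::s (s space-free) iff the token after the
-- LAST space of l is exactly s
lemma pv_match_iff (l s : List Char) (hs : ' ' ∉ s) :
    ((' ' :: s) <:+ l) ↔
      (0 ≤ PySem.Chars.rfind l [' '] ∧
       l.drop ((PySem.Chars.rfind l [' ']).toNat + 1) = s) := by
  rw [pv_rfind_space]
  constructor
  · rintro ⟨pre, rfl⟩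
    set i := pre.length with hi
    have hPi : (pre ++ ' ' :: s)[i]? = some ' ' := by
      simp [hi]
    have hdrop : (pre ++ ' ' :: s).drop (i + 1) = s := by
      rw [List.drop_append]
      simp [hi]
    have hnolater : ∀ j, i < j → (pre ++ ' ' :: s)[j]? ≠ some ' ' := by
      intro j hij hget
      have hj : (pre ++ ' ' :: s)[j]? = ((pre ++ ' ' :: s).drop (i+1))[j - (i+1)]? := by
        rw [List.getElem?_drop]; congr 1; omega
      rw [hj, hdrop] at hget
      exact hs (List.mem_of_getElem? hget)
    have hilen : i ≤ (pre ++ ' ' :: s).length := by simp; omega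
    have hex : ∃ j, j ≤ (pre ++ ' ' :: s).length ∧ (pre ++ ' ' :: s)[j]? = some ' ' :=
      ⟨i, hilen, hPi⟩
    rw [if_pos hex]
    set g := Nat.findGreatest (fun j => (pre ++ ' ' :: s)[j]? = some ' ') (pre ++ ' ' :: s).length with hg
    have hgi : g = i := by
      have h1 : i ≤ g := Nat.le_findGreatest hilen hPi
      rcases Nat.lt_or_ge i g with h | h
      · exact absurd (Nat.findGreatest_spec (P := fun j => (pre ++ ' ' :: s)[j]? = some ' ') hilen hPi) (hnolater g h)
      · omega
    refine ⟨by positivity, ?_⟩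
    rw [hgi]
    simpa using hdrop
  · rintro ⟨hnn, hdrop⟩
    by_cases hex : ∃ j, j ≤ l.length ∧ l[j]? = some ' '
    · rw [if_pos hex] at hnn hdrop
      set g := Nat.findGreatest (fun j => l[j]? = some ' ') l.length with hg
      simp only [Int.toNat_natCast] at hdrop
      obtain ⟨j, hjl, hjP⟩ := hex
      have hPg : l[g]? = some ' ' := Nat.findGreatest_spec (P := fun j => l[j]? = some ' ') hjl hjP
      have hglen : g < l.length := by
        by_contra h
        rw [List.getElem?_eq_none (by omega)] at hPg
        simp at hPg
      have hcons : l.drop g = ' ' :: s := by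
        rw [List.drop_eq_getElem_cons hglen, hdrop]
        congr 1
        have := List.getElem?_eq_getElem hglen
        rw [this] at hPg
        exact Option.some.inj hPg
      rw [← hcons]
      exact List.drop_suffix g l
    · rw [if_neg hex] at hnn; omega

-- A's loop when no suffix condition fires
lemma pv_loop_all_false (name lowered : String) (L : List String)
    (h : ∀ s ∈ L, ¬ PySem.Str.endswith lowered (String.ofList (' ' :: s.toList)) = true) :
    pvStripLoop name lowered L = PySem.Str.strip name := by
  induction L with
  | nil => rfl
  | cons s rest ih =>
    rw [pvStripLoop, if_neg (h s (by simp)), ih (fun t ht => h t (by simp [ht]))]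

-- A's loop when the condition is 'this suffix IS the candidate token' and every match
-- returns the same value V
lemma pv_loop_cand (name lowered : String) (cand : String) (V : String) (L : List String)
    (hcond : ∀ s ∈ L, (PySem.Str.endswith lowered (String.ofList (' ' :: s.toList)) = true) ↔ s = cand)
    (hval : ∀ s ∈ L, s = cand →
      PySem.Str.strip (PySem.Str.slice name none (some (-(PySem.Str.len s + 1)))) = V) :
    pvStripLoop name lowered L = if L.contains cand then V else PySem.Str.strip name := by
  induction L with
  | nil => rfl
  | cons s rest ih =>
    rw [pvStripLoop]
    by_cases hsc : s = cand
    · rw [if_pos ((hcond s (by simp)).mpr hsc), hval s (by simp) hsc]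
      simp [hsc]
    · rw [if_neg (fun hcw => hsc ((hcond s (by simp)).mp hcw)),
        ih (fun t ht => hcond t (by simp [ht])) (fun t ht => hval t (by simp [ht]))]
      have : ((s :: rest).contains cand) = (rest.contains cand) := by
        simp [Ne.symm hsc]
      rw [this]

-- every salt suffix is space-free
lemma pv_suffixes_ok : ∀ s ∈ pvSaltSuffixes, ' ' ∉ s.toList := by decide

lemma pv_set_eq : pvSaltSet = pvSaltSuffixes := by decide

-- negative end slice: xs[:-(k)] for 0 < k ≤ len is take (len - k)
lemma pv_slice_neg {α : Type} (xs : List α) (k : Nat) (h1 : 0 < k) (h2 : k ≤ xs.length) :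
    PySem.List.slice xs none (some (-(k:Int))) = xs.take (xs.length - k) := by
  simp only [PySem.List.slice, PySem.List.clampIdx]
  rw [if_pos (by omega : -(k:Int) < 0), if_neg (by omega : ¬((xs.length:Int) + -(k:Int) < 0))]
  simp
  omega

-- ===== VERDICT (by name: the statement is the Claim_ definition above) =====
set_option maxHeartbeats 1000000 in
theorem strip_salt_suffix_py_spec : Claim_equal_strip_salt_suffix_py := by
  intro name _
  unfold Spec_strip_salt_suffix_py strip_salt_suffix_py strip_salt_suffix_py_alt
  by_cases h0 : name = ""
  · rw [if_pos h0, if_pos h0]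
  · rw [if_neg h0, if_neg h0]
    simp only []
    set lw := PySem.Str.lower name with hlw
    set l := lw.toList with hl
    have hrr : PySem.Str.rfind lw " " = PySem.Chars.rfind l [' '] := by
      rw [PySem.Str.rfind_eq]; rfl
    have hlen : l.length = name.toList.length := by
      rw [hl, hlw, PySem.Str.toList_lower, PySem.Chars.lower, List.length_map]
    have hcondb : ∀ s : String,
        (PySem.Str.endswith lw (String.ofList (' ' :: s.toList)) = true) ↔ ((' ' :: s.toList) <:+ l) := by
      intro s
      rw [PySem.Str.endswith_eq, PySem.Chars.endswith, ← hl, String.toList_ofList]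
      exact List.isSuffixOf_iff_suffix
    clear_value l
    clear_value lw
    have hcases : PySem.Chars.rfind l [' '] = -1 ∨ 0 ≤ PySem.Chars.rfind l [' '] := by
      rw [pv_rfind_space]; split
      · right; positivity
      · left; rfl
    rcases hcases with hneg | hpos
    · -- no space anywhere: no suffix can match, both return name.strip()
      rw [hrr, hneg, if_pos rfl]
      apply pv_loop_all_false
      intro s hsL hcw
      have := ((hcondb s).mp hcw)
      rw [pv_match_iff _ _ (pv_suffixes_ok s hsL), hneg] at this
      omega
    · -- there is a last space, at index i
      obtain ⟨i, hri⟩ : ∃ i : Nat, PySem.Chars.rfind l [' '] = (i : Int) :=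
        ⟨(PySem.Chars.rfind l [' ']).toNat, (Int.toNat_of_nonneg hpos).symm⟩
      rw [hrr, hri, if_neg (by omega)]
      -- the character at i is a space, hence i < l.length
      have hPi : l[i]? = some ' ' := by
        have hr := pv_rfind_space l
        by_cases hex : ∃ j, j ≤ l.length ∧ l[j]? = some ' '
        · rw [if_pos hex, hri] at hr
          obtain ⟨j, hjl, hjP⟩ := hex
          have hig : i = Nat.findGreatest (fun j => l[j]? = some ' ') l.length := by
            omega
          rw [hig]
          exact Nat.findGreatest_spec (P := fun j => l[j]? = some ' ') hjl hjP
        · rw [if_neg hex, hri] at hr; omega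
      have hilen : i < l.length := by
        by_contra h
        rw [List.getElem?_eq_none (by omega)] at hPi
        simp at hPi
      -- the candidate token is the tail after the last space
      have hcandL : (PySem.Str.slice lw (some ((i:Int) + 1)) none).toList = l.drop (i+1) := by
        rw [PySem.Str.toList_slice, PySem.Chars.slice_eq_listSlice, ← hl,
          PySem.List.slice_from l (by omega : (0:Int) ≤ (i:Int) + 1)]
        congr 1
      have hcond : ∀ s ∈ pvSaltSuffixes,
          (PySem.Str.endswith lw (String.ofList (' ' :: s.toList)) = true) ↔
            s = PySem.Str.slice lw (some ((i:Int) + 1)) none := by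
        intro s hsL
        rw [hcondb s, pv_match_iff _ _ (pv_suffixes_ok s hsL), hri]
        simp only [Int.toNat_natCast]
        constructor
        · rintro ⟨-, hdrop⟩
          apply String.toList_inj.mp
          rw [hcandL, hdrop]
        · rintro rfl
          exact ⟨by omega, hcandL.symm⟩
      have hval : ∀ s ∈ pvSaltSuffixes, s = PySem.Str.slice lw (some ((i:Int) + 1)) none →
          PySem.Str.strip (PySem.Str.slice name none (some (-(PySem.Str.len s + 1)))) =
          PySem.Str.strip (PySem.Str.slice name none (some (i:Int))) := by
        intro s _ hs
        congr 1
        apply String.toList_inj.mp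
        rw [PySem.Str.toList_slice, PySem.Str.toList_slice,
          PySem.Chars.slice_eq_listSlice, PySem.Chars.slice_eq_listSlice]
        have hlens : s.toList.length = l.length - (i + 1) := by
          rw [hs, hcandL]; simp
        have hlenpy : PySem.Str.len s = (s.toList.length : Int) := PySem.Str.len_eq s
        have heq : -(PySem.Str.len s + 1) = -((l.length - i : Nat) : Int) := by
          rw [hlenpy, hlens]; omega
        rw [heq, pv_slice_neg _ _ (by omega) (by omega),
          PySem.List.slice_to name.toList (by omega : (0:Int) ≤ (i:Int))]
        congr 1
        omega
      rw [pv_loop_cand name lw (PySem.Str.slice lw (some ((i:Int) + 1)) none) _ pvSaltSuffixes hcond hval]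
      rw [PySem.Set.contains, pv_set_eq]
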